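-- pv_equiv track=rewrite | github.com/Twilight-Dream-Of-Magic/HardPoly1305-MessageAuthCode | hardpoly1305_v2_test.py | _collect_bit_counts_selected
-- ===== SOURCE A (Python) =====
-- from typing import Tuple, List, Optional, Dict, Any
--
-- MASK_256 = (1 << 256) - 1
--
-- def _collect_bit_counts_selected(values: List[int], bit_indices: List[int]) -> List[int]:
--     """
--     Return 1-counts for selected output bit indices (subset of [0..255]).
--     Output list aligns with bit_indices order.
--     """
--     by_byte: Dict[int, List[int]] = {}
--     for j, b in enumerate(bit_indices):
--         if not (0 <= b < 256):
--             raise ValueError("bit index out of range")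
--         by_byte.setdefault(b // 8, []).append(j)
--
--     ones = [0] * len(bit_indices)
--     for v in values:
--         bs = (v & MASK_256).to_bytes(32, "little")
--         for byte_i, slots in by_byte.items():
--             lut = _BIT_LUT[bs[byte_i]]
--             base = byte_i * 8
--             for j in slots:
--                 bit = bit_indices[j] - base
--                 ones[j] += lut[bit]
--     return ones
--
-- _BIT_LUT = [((b >> 0) & 1, (b >> 1) & 1, (b >> 2) & 1, (b >> 3) & 1,
--              (b >> 4) & 1, (b >> 5) & 1, (b >> 6) & 1, (b >> 7) & 1)
--             for b in range(256)]
-- ===== SOURCE B (Python) =====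
-- MASK_256 = (1 << 256) - 1
--
-- def _collect_bit_counts_selected(values, bit_indices):
--     """
--     Return 1-counts for selected output bit indices (subset of [0..255]).
--     Output list aligns with bit_indices order.
--     """
--     for b in bit_indices:
--         if not (0 <= b < 256):
--             raise ValueError("bit index out of range")
--     return [sum(((v & MASK_256) >> b) & 1 for v in values) for b in bit_indices]
-- ===== Notes on version B (the rewrite author's own statement) =====
-- stated objective: simpler
-- what changed: Drops the byte-grouping dict, the 32-byte little-endian conversion and the 256-entry bit LUT: after one up-front validation pass over bit_indices, each count is computed directly as a sum of ((v & MASK_256) >> b) & 1 over the values.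
import Mathlib
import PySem

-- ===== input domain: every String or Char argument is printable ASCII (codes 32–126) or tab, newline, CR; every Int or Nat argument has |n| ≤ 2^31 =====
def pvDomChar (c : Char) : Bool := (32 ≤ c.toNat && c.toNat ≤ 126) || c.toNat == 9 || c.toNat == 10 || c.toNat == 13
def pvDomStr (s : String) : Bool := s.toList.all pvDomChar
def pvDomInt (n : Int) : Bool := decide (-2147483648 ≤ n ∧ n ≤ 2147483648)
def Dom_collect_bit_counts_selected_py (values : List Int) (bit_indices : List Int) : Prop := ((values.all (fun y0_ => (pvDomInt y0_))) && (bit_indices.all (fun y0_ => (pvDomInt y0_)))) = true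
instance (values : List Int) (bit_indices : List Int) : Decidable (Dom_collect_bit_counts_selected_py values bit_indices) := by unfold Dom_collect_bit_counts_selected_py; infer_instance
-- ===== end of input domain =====

-- B replaces A's byte-grouping dict + 32-byte little-endian conversion + 256-entry bit LUT by a
-- direct per-index bit-extraction sum (objective: simpler).

-- ===== PORT A =====
def pvMASK : Int := 2 ^ 256 - 1   -- MASK_256 = (1 << 256) - 1

-- Python's  n >> k  for k ≥ 0 (is core Lean's shift; a named helper keeps the Nat-shift instance)
def pvShiftR (a : Int) (n : Nat) : Int := a >>> n

-- _BIT_LUT[x] ported as a function of the byte value x: exact for 0 ≤ x < 256, the only values it is indexed with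
def pvBitLUT (x : Int) : List Int := (List.range 8).map (fun t => PySem.Int.band (pvShiftR x t) 1)

-- (v & MASK_256).to_bytes(32, "little") ported by hand: byte t of a nonnegative m < 2^256 is (m >> 8*t) % 256 (exact)
def pvBytes32 (m : Int) : List Int := (List.range 32).map (fun t => pvShiftR m (8 * t) % 256)

-- the first loop of A: builds by_byte; none = the ValueError path
def pvBuildByByte (bit_indices : List Int) : Option (PySem.Dict Int (List Int)) :=
  (PySem.List.enumerate bit_indices).foldl
    (fun (acc : Option (PySem.Dict Int (List Int))) (jb : Int × Int) =>
      match acc with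
      | none => none
      | some d =>
        if 0 ≤ jb.2 ∧ jb.2 < 256 then
          -- by_byte.setdefault(b // 8, []).append(j)  =  d[b//8] = d.get(b//8, []) + [j]
          some (d.modify (PySem.Int.floordiv jb.2 8) [] (fun xs => xs ++ [jb.1]))
        else none)
    (some PySem.Dict.empty)

def collect_bit_counts_selected_py (values : List Int) (bit_indices : List Int) : List Int :=
  match pvBuildByByte bit_indices with
  | none => []   -- ValueError("bit index out of range"); excluded by Pre_
  | some by_byte =>
    values.foldl
      (fun ones v =>
        by_byte.items.foldl
          (fun ones p =>
            p.2.foldl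
              (fun ones j =>
                PySem.List.pySetD ones j
                  (PySem.List.pyGetD ones j 0 +
                   PySem.List.pyGetD
                     (pvBitLUT (PySem.List.pyGetD (pvBytes32 (PySem.Int.band v pvMASK)) p.1 0))
                     (PySem.List.pyGetD bit_indices j 0 - p.1 * 8) 0))
              ones)
          ones)
      (List.replicate bit_indices.length 0)

-- ===== PORT B =====
def collect_bit_counts_selected_py_alt (values : List Int) (bit_indices : List Int) : List Int :=
  if bit_indices.all (fun b => decide (0 ≤ b ∧ b < 256)) then
    bit_indices.map (fun b =>
      (values.map (fun v => PySem.Int.band (pvShiftR (PySem.Int.band v pvMASK) b.toNat) 1)).sum)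
  else []   -- ValueError("bit index out of range"); excluded by Pre_

-- ===== PRECONDITION & SPEC =====
-- Pre_ excludes exactly the inputs on which A (and B) raises ValueError: some bit index outside [0, 256).
def Pre_collect_bit_counts_selected_py (values : List Int) (bit_indices : List Int) : Prop :=
  ∀ b ∈ bit_indices, 0 ≤ b ∧ b < 256
instance (values : List Int) (bit_indices : List Int) : Decidable (Pre_collect_bit_counts_selected_py values bit_indices) := by unfold Pre_collect_bit_counts_selected_py; infer_instance

def pvWitness_collect_bit_counts_selected_py : List Int × List Int := ([3, 5], [0, 1, 255])

def Spec_collect_bit_counts_selected_py (values : List Int) (bit_indices : List Int) (out : List Int) : Prop := out = collect_bit_counts_selected_py_alt values bit_indices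
instance (values : List Int) (bit_indices : List Int) (out : List Int) : Decidable (Spec_collect_bit_counts_selected_py values bit_indices out) := by unfold Spec_collect_bit_counts_selected_py; infer_instance

-- ===== CLAIM (what is proved, stated in full; the proofs are below) =====
def Claim_equal_collect_bit_counts_selected_py : Prop := ∀ (values : List Int) (bit_indices : List Int), Dom_collect_bit_counts_selected_py values bit_indices → Pre_collect_bit_counts_selected_py values bit_indices → Spec_collect_bit_counts_selected_py values bit_indices (collect_bit_counts_selected_py values bit_indices)

-- ===== LEMMAS AND PROOFS =====

-- the bit B extracts for value v at bit index b
def pvG (v b : Int) : Int := PySem.Int.band (pvShiftR (PySem.Int.band v pvMASK) b.toNat) 1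

def pvKey (b : Int) : Int := PySem.Int.floordiv b 8

-- the pairs (b // 8, j) in enumeration order
def pvL (bit_indices : List Int) : List (Int × Int) :=
  (PySem.List.enumerate bit_indices).map (fun jb => (pvKey jb.2, jb.1))

-- the dict A's first loop builds (when no index is out of range)
def pvD (bit_indices : List Int) : PySem.Dict Int (List Int) :=
  (pvL bit_indices).foldl (fun d p => d.modify p.1 [] (fun xs => xs ++ [p.2])) PySem.Dict.empty

def pvBucket (bit_indices : List Int) (c : Int) : List Int :=
  ((pvL bit_indices).filter (fun p => p.1 == c)).map (fun p => p.2)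

-- A's per-value inner double loop, with by_byte = pvD
def pvStepA (bit_indices : List Int) (ones : List Int) (v : Int) : List Int :=
  (pvD bit_indices).items.foldl
    (fun ones p =>
      p.2.foldl
        (fun ones j =>
          PySem.List.pySetD ones j
            (PySem.List.pyGetD ones j 0 +
             PySem.List.pyGetD
               (pvBitLUT (PySem.List.pyGetD (pvBytes32 (PySem.Int.band v pvMASK)) p.1 0))
               (PySem.List.pyGetD bit_indices j 0 - p.1 * 8) 0))
        ones)
    ones

lemma pv_mask_pos : (0:Int) ≤ pvMASK := by unfold pvMASK; norm_num

lemma pv_m_nonneg (v : Int) : 0 ≤ PySem.Int.band v pvMASK := by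
  rw [PySem.Int.band_comm]
  exact PySem.Int.band_nonneg_of_nonneg_left v pv_mask_pos

lemma pv_shift_natCast (M t : Nat) : pvShiftR (M : Int) t = ((M >>> t : Nat) : Int) := rfl

lemma pv_natbit (M k r : Nat) (hr : r < 8) :
    (((M >>> (8 * k)) % 256) >>> r) &&& 1 = (M >>> (8 * k + r)) &&& 1 := by
  rw [Nat.shiftRight_add]
  set X := M >>> (8 * k) with hX
  simp only [Nat.shiftRight_eq_div_pow, Nat.and_one_is_mod]
  rw [← Nat.mod_mul_right_div_self X (2 ^ r) 2, ← Nat.mod_mul_right_div_self (X % 256) (2 ^ r) 2]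
  have hdvd : 2 ^ r * 2 ∣ 256 := by
    rw [show (2 : Nat) ^ r * 2 = 2 ^ (r + 1) from by ring, show (256 : Nat) = 2 ^ 8 from by norm_num]
    exact pow_dvd_pow 2 (by omega)
  rw [Nat.mod_mod_of_dvd _ hdvd]

lemma pv_biteq (v b : Int) (hb0 : 0 ≤ b) (hb : b < 256) :
    PySem.List.pyGetD
      (pvBitLUT (PySem.List.pyGetD (pvBytes32 (PySem.Int.band v pvMASK)) (pvKey b) 0))
      (b - pvKey b * 8) 0 = pvG v b := by
  obtain ⟨bn, rfl⟩ : ∃ bn : Nat, b = (bn : Int) := ⟨b.toNat, (Int.toNat_of_nonneg hb0).symm⟩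
  have hbn : bn < 256 := by exact_mod_cast hb
  obtain ⟨M, hM⟩ : ∃ M : Nat, PySem.Int.band v pvMASK = (M : Int) :=
    ⟨_, (Int.toNat_of_nonneg (pv_m_nonneg v)).symm⟩
  have hkey : pvKey (bn : Int) = ((bn / 8 : Nat) : Int) := by
    unfold pvKey; exact_mod_cast PySem.Int.floordiv_natCast bn 8
  have hidx : (bn : Int) - pvKey (bn : Int) * 8 = ((bn % 8 : Nat) : Int) := by
    rw [hkey]; push_cast; omega
  rw [hidx, hkey, hM]
  unfold pvBytes32 pvBitLUT
  have hbyte : pvShiftR ((M : Int)) (8 * (bn / 8)) % 256 =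
      (((M >>> (8 * (bn / 8))) % 256 : Nat) : Int) := by
    rw [pv_shift_natCast]; omega
  simp only [PySem.List.pyGetD_natCast]
  rw [PySem.List.getD_map_range _ _ _ _ (by omega : bn / 8 < 32)]
  rw [hbyte]
  rw [PySem.List.getD_map_range _ _ _ _ (by omega : bn % 8 < 8)]
  unfold pvG
  rw [hM, Int.toNat_natCast]
  rw [pv_shift_natCast, pv_shift_natCast]
  rw [show (1 : Int) = ((1 : Nat) : Int) from rfl]
  rw [PySem.Int.band_natCast, PySem.Int.band_natCast]
  rw [pv_natbit M (bn / 8) (bn % 8) (by omega), Nat.div_add_mod bn 8]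

lemma pv_build_aux (l : List (Int × Int)) :
    ∀ d : PySem.Dict Int (List Int), (∀ p ∈ l, 0 ≤ p.2 ∧ p.2 < 256) →
    l.foldl
      (fun (acc : Option (PySem.Dict Int (List Int))) (jb : Int × Int) =>
        match acc with
        | none => none
        | some d =>
          if 0 ≤ jb.2 ∧ jb.2 < 256 then
            some (d.modify (PySem.Int.floordiv jb.2 8) [] (fun xs => xs ++ [jb.1]))
          else none)
      (some d)
    = some (l.foldl (fun d jb => d.modify (PySem.Int.floordiv jb.2 8) [] (fun xs => xs ++ [jb.1])) d) := by
  induction l with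
  | nil => intro d _; rfl
  | cons p l ih =>
    intro d h
    simp only [List.foldl_cons]
    rw [if_pos (h p List.mem_cons_self)]
    exact ih _ (fun q hq => h q (List.mem_cons_of_mem _ hq))

lemma pv_build_eq (bit_indices : List Int)
    (h : ∀ b ∈ bit_indices, 0 ≤ b ∧ b < 256) :
    pvBuildByByte bit_indices = some (pvD bit_indices) := by
  unfold pvBuildByByte pvD pvL
  rw [List.foldl_map]
  exact pv_build_aux (PySem.List.enumerate bit_indices) PySem.Dict.empty
    (fun p hp => by
      rw [PySem.List.mem_enumerate_iff] at hp
      obtain ⟨k, hk, rfl⟩ := hp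
      exact h _ (List.getElem_mem hk))

lemma pv_mem_L (bit_indices : List Int) (c j : Int) :
    (c, j) ∈ pvL bit_indices ↔
      ∃ (k : Nat) (hk : k < bit_indices.length), j = (k : Int) ∧ c = pvKey bit_indices[k] := by
  unfold pvL
  rw [List.mem_map]
  constructor
  · rintro ⟨jb, hjb, heq⟩
    rw [PySem.List.mem_enumerate_iff] at hjb
    obtain ⟨k, hk, rfl⟩ := hjb
    refine ⟨k, hk, ?_, ?_⟩
    · have := congrArg Prod.snd heq; simp at this; omega
    · have := congrArg Prod.fst heq; simp at this; exact this.symm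
  · rintro ⟨k, hk, rfl, rfl⟩
    refine ⟨((0 : Int) + k, bit_indices[k]), ?_, by simp⟩
    rw [PySem.List.mem_enumerate_iff]
    exact ⟨k, hk, rfl⟩

lemma pv_getD_D (bit_indices : List Int) (c : Int) :
    (pvD bit_indices).getD c [] = pvBucket bit_indices c := by
  unfold pvD pvBucket
  rw [PySem.Dict.getD_foldl_modify_append]
  simp

lemma pv_keys_nodup (bit_indices : List Int) : (pvD bit_indices).keys.Nodup := by
  unfold pvD
  exact PySem.Dict.nodup_keys_foldl_modify_key (pvL bit_indices) (fun p => p.1) []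
    (fun _ p => fun xs => xs ++ [p.2]) PySem.Dict.empty PySem.Dict.nodup_keys_empty

lemma pv_mem_keys (bit_indices : List Int) (c : Int) :
    c ∈ (pvD bit_indices).keys ↔ c ∈ (pvL bit_indices).map (fun p => p.1) := by
  unfold pvD
  rw [PySem.Dict.keys_foldl_modify_key (pvL bit_indices) (fun p => p.1) []
    (fun _ p => fun xs => xs ++ [p.2]) PySem.Dict.empty]
  rw [PySem.Dict.keys_empty]
  rw [show PySem.Set.update ([] : List Int) ((pvL bit_indices).map (fun p => p.1)) =
        PySem.Set.ofList ((pvL bit_indices).map (fun p => p.1)) from rfl]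
  exact PySem.Set.mem_ofList _ _

lemma pv_mem_bucket (bit_indices : List Int) (c j : Int) :
    j ∈ pvBucket bit_indices c ↔ (c, j) ∈ pvL bit_indices := by
  unfold pvBucket
  simp only [List.mem_map, List.mem_filter, beq_iff_eq]
  constructor
  · rintro ⟨⟨c', j'⟩, ⟨hmem, hc⟩, hj⟩
    simp only at hc hj
    subst hc; subst hj; exact hmem
  · intro h
    exact ⟨(c, j), ⟨h, rfl⟩, rfl⟩

lemma pv_flat_nodup (keys : List Int) (bucket : Int → List Int) (hk : keys.Nodup)
    (hb : ∀ c, (bucket c).Nodup)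
    (hdet : ∀ c c' j, j ∈ bucket c → j ∈ bucket c' → c = c') :
    (keys.flatMap bucket).Nodup := by
  induction keys with
  | nil => simp
  | cons c ks ih =>
    rw [List.flatMap_cons, List.nodup_append]
    rw [List.nodup_cons] at hk
    refine ⟨hb c, ih hk.2, ?_⟩
    intro a ha b hbm
    rw [List.mem_flatMap] at hbm
    obtain ⟨c', hc', hbc'⟩ := hbm
    rintro rfl
    exact hk.1 (hdet c c' a ha hbc' ▸ hc')

lemma pv_bucket_nodup (bit_indices : List Int) (c : Int) : (pvBucket bit_indices c).Nodup := by
  have h1 : ((pvL bit_indices).map (fun p => p.2)).Nodup := by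
    unfold pvL
    rw [List.map_map]
    rw [show ((fun p : Int × Int => p.2) ∘ (fun jb : Int × Int => (pvKey jb.2, jb.1))) =
          (fun jb : Int × Int => jb.1) from rfl]
    rw [PySem.List.map_fst_enumerate]
    exact PySem.List.nodup_pyRange_one _ _
  unfold pvBucket
  exact h1.sublist (List.Sublist.map _ List.filter_sublist)

lemma pv_F_nodup (bit_indices : List Int) :
    ((pvD bit_indices).keys.flatMap (pvBucket bit_indices)).Nodup := by
  apply pv_flat_nodup _ _ (pv_keys_nodup bit_indices) (pv_bucket_nodup bit_indices)
  intro c c' j h1 h2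
  rw [pv_mem_bucket, pv_mem_L] at h1 h2
  obtain ⟨k, hk, hj, hc⟩ := h1
  obtain ⟨k', hk', hj', hc'⟩ := h2
  have hkk : k' = k := by omega
  subst hkk; subst hc; subst hc'; rfl

lemma pv_mem_F (bit_indices : List Int) (i : Int) :
    i ∈ (pvD bit_indices).keys.flatMap (pvBucket bit_indices) ↔
      0 ≤ i ∧ i < (bit_indices.length : Int) := by
  rw [List.mem_flatMap]
  constructor
  · rintro ⟨c, hc, hj⟩
    rw [pv_mem_bucket, pv_mem_L] at hj
    obtain ⟨k, hk, rfl, -⟩ := hj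
    exact ⟨by positivity, by exact_mod_cast hk⟩
  · rintro ⟨h0, hn⟩
    obtain ⟨k, rfl⟩ : ∃ k : Nat, i = (k : Int) := ⟨i.toNat, (Int.toNat_of_nonneg h0).symm⟩
    have hk : k < bit_indices.length := by exact_mod_cast hn
    refine ⟨pvKey bit_indices[k], ?_, ?_⟩
    · rw [pv_mem_keys, List.mem_map]
      exact ⟨(pvKey bit_indices[k], (k : Int)),
        (pv_mem_L bit_indices _ _).mpr ⟨k, hk, rfl, rfl⟩, rfl⟩
    · rw [pv_mem_bucket, pv_mem_L]
      exact ⟨k, hk, rfl, rfl⟩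

lemma pv_tabmap (l : List Int) (f : Int → Int) :
    (List.range l.length).map (fun i => f (l.getD i 0)) = l.map f := by
  apply List.ext_getElem
  · simp
  · intro i h1 h2
    simp only [List.getElem_map, List.getElem_range]
    rw [List.getD_eq_getElem l 0 (by simpa using h2)]

lemma pv_tab (l : List Int) : (List.range l.length).map (fun i => l.getD i 0) = l := by
  have := pv_tabmap l id
  simpa using this

lemma pv_foldset (g : Int → Int) (F : List Int) :
    ∀ (ones : List Int), F.Nodup → (∀ j ∈ F, 0 ≤ j ∧ j < (ones.length : Int)) →
    F.foldl (fun o j => PySem.List.pySetD o j (PySem.List.pyGetD o j 0 + g j)) ones =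
      (List.range ones.length).map (fun i => ones.getD i 0 + if (i : Int) ∈ F then g i else 0) := by
  induction F with
  | nil =>
    intro ones _ _
    simp only [List.foldl_nil]
    rw [show (fun i => ones.getD i 0 + if ((i : Nat) : Int) ∈ ([] : List Int) then g i else 0) =
          (fun i => ones.getD i 0) from funext fun i => by simp]
    exact (pv_tab ones).symm
  | cons j F ih =>
    intro ones hnd hbnd
    have hj := hbnd j List.mem_cons_self
    obtain ⟨k, rfl⟩ : ∃ k : Nat, j = (k : Int) := ⟨j.toNat, (Int.toNat_of_nonneg hj.1).symm⟩
    have hk : k < ones.length := by exact_mod_cast hj.2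
    rw [List.nodup_cons] at hnd
    simp only [List.foldl_cons]
    rw [ih _ hnd.2 (fun j' hj' => by
      rw [PySem.List.length_pySetD]
      exact hbnd j' (List.mem_cons_of_mem _ hj'))]
    rw [PySem.List.length_pySetD]
    apply List.map_congr_left
    intro i hi
    rw [List.mem_range] at hi
    have hset : (PySem.List.pySetD ones (k : Int)
        (PySem.List.pyGetD ones (k : Int) 0 + g (k : Int))).getD i 0 =
        if k = i then PySem.List.pyGetD ones (k : Int) 0 + g (k : Int) else ones.getD i 0 := by
      rw [PySem.List.pySetD_natCast]
      simp only [List.getD_eq_getElem?_getD, List.getElem?_set, hk, if_true]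
      by_cases h : k = i
      · simp [h]
      · simp [h]
    rw [hset]
    by_cases h : k = i
    · subst h
      have hmem : ((k : Int)) ∈ ((k : Int)) :: F := List.mem_cons_self
      rw [if_pos rfl, if_pos hmem, if_neg hnd.1]
      rw [PySem.List.pyGetD_natCast]
      ring
    · have hne : ((i : Int)) ≠ ((k : Int)) := by
        intro hc; exact h (by exact_mod_cast hc.symm)
      rw [if_neg h]
      rw [if_congr (show (((i : Int)) ∈ ((k : Int)) :: F) ↔ ((i : Int)) ∈ F by
        simp [List.mem_cons, hne]) rfl rfl]

lemma pv_inner (bit_indices : List Int) (hpre : ∀ b ∈ bit_indices, 0 ≤ b ∧ b < 256)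
    (v : Int) (ones : List Int) (hlen : ones.length = bit_indices.length) :
    pvStepA bit_indices ones v =
    (List.range bit_indices.length).map (fun i => ones.getD i 0 + pvG v (bit_indices.getD i 0)) := by
  unfold pvStepA
  rw [PySem.Dict.items_eq_map_keys _ (pv_keys_nodup bit_indices) []]
  rw [List.foldl_map]
  rw [PySem.List.foldl_congr_mem _ _
    (fun (o : List Int) (c : Int) => (pvBucket bit_indices c).foldl
      (fun o j => PySem.List.pySetD o j
        (PySem.List.pyGetD o j 0 + pvG v (bit_indices.getD j.toNat 0))) o) ones
    (by
      intro acc c hc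
      simp only [pv_getD_D]
      apply PySem.List.foldl_congr_mem
      intro o j hj
      rw [pv_mem_bucket, pv_mem_L] at hj
      obtain ⟨k, hk, rfl, rfl⟩ := hj
      have hb : bit_indices.getD k 0 = bit_indices[k] := List.getD_eq_getElem _ _ hk
      have hbmem := hpre bit_indices[k] (List.getElem_mem hk)
      have hbit := pv_biteq v bit_indices[k] hbmem.1 hbmem.2
      simp only [PySem.List.pyGetD_natCast, Int.toNat_natCast, hb]
      rw [hbit])]
  rw [← List.foldl_flatMap]
  rw [pv_foldset _ _ ones (pv_F_nodup bit_indices)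
    (fun j hj => by rw [hlen]; exact (pv_mem_F bit_indices j).mp hj)]
  rw [hlen]
  apply List.map_congr_left
  intro i hi
  rw [List.mem_range] at hi
  rw [if_pos ((pv_mem_F bit_indices (i : Int)).mpr ⟨by positivity, by exact_mod_cast hi⟩)]
  rw [Int.toNat_natCast]

lemma pv_outer (bit_indices : List Int) (hpre : ∀ b ∈ bit_indices, 0 ≤ b ∧ b < 256) :
    ∀ (values : List Int) (ones : List Int), ones.length = bit_indices.length →
    values.foldl (pvStepA bit_indices) ones =
    (List.range bit_indices.length).map
      (fun i => ones.getD i 0 + (values.map (fun v => pvG v (bit_indices.getD i 0))).sum) := by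
  intro values
  induction values with
  | nil =>
    intro ones hlen
    simp only [List.foldl_nil, List.map_nil, List.sum_nil, add_zero]
    rw [← hlen]
    exact (pv_tab ones).symm
  | cons v vs ih =>
    intro ones hlen
    simp only [List.foldl_cons]
    rw [pv_inner bit_indices hpre v ones hlen]
    rw [ih _ (by simp)]
    apply List.map_congr_left
    intro i hi
    rw [List.mem_range] at hi
    rw [PySem.List.getD_map_range _ _ _ _ hi]
    simp only [List.map_cons, List.sum_cons]
    ring

-- ===== VERDICT (by name: the statement is the Claim_ definition above) =====
theorem collect_bit_counts_selected_py_spec : Claim_equal_collect_bit_counts_selected_py := by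
  intro values bit_indices _hd hpre
  unfold Spec_collect_bit_counts_selected_py
  have hA : collect_bit_counts_selected_py values bit_indices =
      values.foldl (pvStepA bit_indices) (List.replicate bit_indices.length 0) := by
    unfold collect_bit_counts_selected_py
    rw [pv_build_eq bit_indices hpre]
    rfl
  rw [hA, pv_outer bit_indices hpre values _ (by simp)]
  unfold collect_bit_counts_selected_py_alt
  rw [if_pos (by simp only [List.all_eq_true, decide_eq_true_eq]; exact hpre)]
  refine Eq.trans ?_ (pv_tabmap bit_indices (fun b => (values.map (fun v => pvG v b)).sum))
  apply List.map_congr_left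
  intro i hi
  rw [List.mem_range] at hi
  rw [List.getD_replicate _ hi, zero_add]
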